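-- pv_equiv track=rewrite | github.com/sevenhe716/LeetCode | Array/q683_k_empty_slots.py | kEmptySlots2
-- ===== SOURCE A (Python) =====
-- from collections import deque
--
-- def kEmptySlots2(flowers, k):
--     days = [0] * len(flowers)
--     for day, position in enumerate(flowers, 1):
--         days[position - 1] = day
--
--     window = MinQueue()
--     ans = len(days)
--
--     for i, day in enumerate(days):
--         window.append(day)
--         if k <= i < len(days) - 1:
--             window.popleft()
--             if k == 0 or days[i - k] < window.min() > days[i + 1]:
--                 ans = min(ans, max(days[i - k], days[i + 1]))
--
--     return ans if ans <= len(days) else -1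
--
-- class MinQueue(deque):
--     def __init__(self):
--         deque.__init__(self)
--         self.mins = deque()
--
--     def append(self, x):
--         deque.append(self, x)
--         while self.mins and x < self.mins[-1]:
--             self.mins.pop()
--         self.mins.append(x)
--
--     def popleft(self):
--         x = deque.popleft(self)
--         if self.mins[0] == x:
--             self.mins.popleft()
--         return x
--
--     def min(self):
--         return self.mins[0]
-- ===== SOURCE B (Python) =====
-- def kEmptySlots2(flowers, k):
--     n = len(flowers)
--     days = [0] * n
--     for day, position in enumerate(flowers, 1):
--         days[position - 1] = day
--
--     ans = n
--     for l in range(n - k - 1):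
--         r = l + k + 1
--         if k == 0 or days[l] < min(days[l + 1:r]) > days[r]:
--             ans = min(ans, max(days[l], days[r]))
--     return ans
-- ===== Notes on version B (the rewrite author's own statement) =====
-- stated objective: simpler
-- what changed: B drops A's hand-rolled MinQueue (a deque subclass maintaining a monotonic min-deque in a sliding window) and instead directly scans each candidate pair (l, l+k+1), testing the k slots between with a plain min() over a slice; the custom data structure and its append/popleft bookkeeping disappear.
-- outside the precondition, e.g. on kEmptySlots2([1], -1): A returns 1, B raises ValueError; on kEmptySlots2([], -2): A returns 0, B raises IndexError
import Mathlib
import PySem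

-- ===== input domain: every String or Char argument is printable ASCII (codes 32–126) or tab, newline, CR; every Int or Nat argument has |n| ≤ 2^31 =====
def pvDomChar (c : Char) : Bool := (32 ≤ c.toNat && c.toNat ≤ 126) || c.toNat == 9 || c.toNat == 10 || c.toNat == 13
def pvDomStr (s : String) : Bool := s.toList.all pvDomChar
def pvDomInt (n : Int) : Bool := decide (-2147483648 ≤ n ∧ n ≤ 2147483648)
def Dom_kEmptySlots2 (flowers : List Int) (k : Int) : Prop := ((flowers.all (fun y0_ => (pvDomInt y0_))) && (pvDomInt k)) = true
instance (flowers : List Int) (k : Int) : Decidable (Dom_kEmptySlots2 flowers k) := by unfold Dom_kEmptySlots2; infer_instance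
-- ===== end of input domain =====

-- B replaces A's hand-rolled monotonic MinQueue sliding-window scan with a direct scan of
-- candidate pairs (l, l+k+1) testing the k slots in between via a plain slice minimum (simpler).

-- ===== PORT A =====
-- days = [0]*n; for day, position in enumerate(flowers, 1): days[position-1] = day
-- (this input normalisation is the same line in both Pythons, so it is a shared helper)
def pvBuildDays (flowers : List Int) : List Int :=
  (PySem.List.enumerate flowers 1).foldl
    (fun days dp => PySem.List.pySetD days (dp.2 - 1) dp.1)
    (List.replicate flowers.length 0)

-- MinQueue.append's while-loop: while self.mins and x < self.mins[-1]: self.mins.pop()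
def pvMinsDrop (m : List Int) (x : Int) : List Int :=
  if h : m = [] then m
  else if x < m.getLast h then pvMinsDrop m.dropLast x else m
termination_by m.length
decreasing_by
  simp only [List.length_dropLast]
  have := List.length_pos_iff.mpr h
  omega

-- the body of A's main loop (state = (window deque, mins deque, ans))
def pvAStep (days : List Int) (k n : Int) (st : List Int × List Int × Int) (p : Int × Int) :
    List Int × List Int × Int :=
  let q := st.1 ++ [p.2]                                -- window.append(day): deque.append
  let mins := pvMinsDrop st.2.1 p.2 ++ [p.2]            -- … and the mins maintenance
  if k ≤ p.1 ∧ p.1 < n - 1 then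
    let x := q.headD 0                                  -- window.popleft(): x = deque.popleft(self)
    let q2 := q.tail
    let mins2 := if mins.headD 0 = x then mins.tail else mins   -- if self.mins[0] == x: popleft
    let dl := PySem.List.pyGetD days (p.1 - k) 0
    let dr := PySem.List.pyGetD days (p.1 + 1) 0
    let ans2 := if k = 0 ∨ (dl < mins2.headD 0 ∧ mins2.headD 0 > dr)
                then min st.2.2 (max dl dr) else st.2.2
    (q2, mins2, ans2)
  else (q, mins, st.2.2)

def kEmptySlots2 (flowers : List Int) (k : Int) : Int :=
  let days := pvBuildDays flowers
  let n : Int := days.length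
  let st := (PySem.List.enumerate days 0).foldl (pvAStep days k n) (([] : List Int), ([] : List Int), n)
  if st.2.2 ≤ n then st.2.2 else -1

-- ===== PORT B =====
-- the body of B's loop over l
def pvBStep (days : List Int) (k : Int) (ans l : Int) : Int :=
  let r := l + k + 1
  let dl := PySem.List.pyGetD days l 0
  let dr := PySem.List.pyGetD days r 0
  let mn := (PySem.List.min? (PySem.List.slice days (some (l + 1)) (some r)) (fun y => y)).getD 0
  if k = 0 ∨ (dl < mn ∧ mn > dr) then min ans (max dl dr) else ans

def kEmptySlots2_alt (flowers : List Int) (k : Int) : Int :=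
  let days := pvBuildDays flowers
  let n : Int := flowers.length
  (PySem.List.pyRange 0 (n - k - 1) 1).foldl (pvBStep days k) n

-- ===== PRECONDITION & SPEC =====
-- Pre_ requires 0 ≤ k and Python-indexable bloom positions (on anything else A raises IndexError,
-- except that for negative k on lists of length ≤ 1 A still returns the length while B's slice-min raises).
def Pre_kEmptySlots2 (flowers : List Int) (k : Int) : Prop :=
  0 ≤ k ∧ ∀ p ∈ flowers, 1 - (flowers.length : Int) ≤ p ∧ p ≤ (flowers.length : Int)
instance (flowers : List Int) (k : Int) : Decidable (Pre_kEmptySlots2 flowers k) := by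
  unfold Pre_kEmptySlots2; infer_instance
def pvWitness_kEmptySlots2 : List Int × Int := ([3, 1, 2], 1)

def Spec_kEmptySlots2 (flowers : List Int) (k : Int) (out : Int) : Prop := out = kEmptySlots2_alt flowers k
instance (flowers : List Int) (k : Int) (out : Int) : Decidable (Spec_kEmptySlots2 flowers k out) := by unfold Spec_kEmptySlots2; infer_instance

-- ===== CLAIM (what is proved, stated in full; the proofs are below) =====
def Claim_equal_kEmptySlots2 : Prop := ∀ (flowers : List Int) (k : Int), Dom_kEmptySlots2 flowers k → Pre_kEmptySlots2 flowers k → Spec_kEmptySlots2 flowers k (kEmptySlots2 flowers k)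

-- ===== LEMMAS AND PROOFS =====

-- pvSfx w = the mins deque A's MinQueue maintains for window contents w:
-- the subsequence of elements that are ≤ every element to their right.
def pvSfx : List Int → List Int
  | [] => []
  | a :: t => if t.all (fun x => a ≤ x) then a :: pvSfx t else pvSfx t

theorem mem_pvSfx {y : Int} {w : List Int} (h : y ∈ pvSfx w) : y ∈ w := by
  induction w with
  | nil => simp [pvSfx] at h
  | cons a t ih =>
    by_cases hall : t.all (fun x => a ≤ x)
    · simp only [pvSfx, hall, if_pos] at h
      rcases List.mem_cons.mp h with h | h
      · simp [h]
      · exact List.mem_cons_of_mem _ (ih h)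
    · simp only [pvSfx, hall, if_neg, Bool.false_eq_true, not_false_iff] at h
      exact List.mem_cons_of_mem _ (ih h)

-- the head of the mins deque is the minimum of the window
theorem pvSfx_head_min {w : List Int} (h : w ≠ []) (d : Int) :
    (pvSfx w).headD d ∈ w ∧ ∀ y ∈ w, (pvSfx w).headD d ≤ y := by
  induction w with
  | nil => exact absurd rfl h
  | cons a t ih =>
    by_cases hall : t.all (fun x => a ≤ x)
    · simp only [pvSfx, hall, if_pos, List.headD_cons]
      refine ⟨List.mem_cons_self, ?_⟩
      intro y hy
      rcases List.mem_cons.mp hy with rfl | hy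
      · exact le_refl _
      · exact of_decide_eq_true (List.all_eq_true.mp hall y hy)
    · have ht : t ≠ [] := by
        rintro rfl; simp at hall
      obtain ⟨hmem, hmin⟩ := ih ht
      simp only [pvSfx, hall, if_neg, Bool.false_eq_true, not_false_iff]
      refine ⟨List.mem_cons_of_mem _ hmem, ?_⟩
      intro y hy
      rcases List.mem_cons.mp hy with rfl | hy
      · -- some element of t is < a, and headD ≤ it
        simp only [List.all_eq_true, not_forall] at hall
        obtain ⟨z, hz, hza⟩ := hall
        have : z < y := by
          by_contra hc
          exact hza (decide_eq_true (by omega))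
        exact le_of_lt (lt_of_le_of_lt (hmin z hz) this)
      · exact hmin y hy

theorem pvMinsDrop_cons {x a : Int} (m : List Int) (hxa : ¬ x < a) :
    pvMinsDrop (a :: m) x = a :: pvMinsDrop m x := by
  induction hm : m.length generalizing m with
  | zero =>
    have : m = [] := List.length_eq_zero_iff.mp hm
    subst this
    simp [pvMinsDrop, hxa]
  | succ n ih =>
    have hmne : m ≠ [] := by rintro rfl; simp at hm
    have hcne : (a :: m) ≠ [] := by simp
    rw [pvMinsDrop, dif_neg hcne]
    conv_rhs => rw [pvMinsDrop, dif_neg hmne]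
    rw [List.getLast_cons hmne]
    by_cases hx : x < m.getLast hmne
    · rw [if_pos hx, if_pos hx]
      have hdl : (a :: m).dropLast = a :: m.dropLast := by
        cases m with
        | nil => exact absurd rfl hmne
        | cons b t => simp [List.dropLast_cons₂]
      rw [hdl, ih m.dropLast (by simp [List.length_dropLast, hm])]
    · rw [if_neg hx, if_neg hx]

theorem pvMinsDrop_all_lt {x : Int} (m : List Int) (h : ∀ y ∈ m, x < y) :
    pvMinsDrop m x = [] := by
  induction hm : m.length generalizing m with
  | zero =>
    have : m = [] := List.length_eq_zero_iff.mp hm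
    subst this; simp [pvMinsDrop]
  | succ n ih =>
    have hmne : m ≠ [] := by rintro rfl; simp at hm
    rw [pvMinsDrop]
    simp only [hmne, reduceDIte]
    rw [if_pos (h _ (List.getLast_mem hmne))]
    exact ih m.dropLast (fun y hy => h y (List.mem_of_mem_dropLast hy)) (by simp [List.length_dropLast, hm])

-- MinQueue.append maintains pvSfx of the window
theorem pvSfx_append (w : List Int) (x : Int) :
    pvSfx (w ++ [x]) = pvMinsDrop (pvSfx w) x ++ [x] := by
  induction w with
  | nil =>
    simp [pvSfx]
    rw [pvMinsDrop]; simp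
  | cons a t ih =>
    by_cases hall : t.all (fun x => a ≤ x)
    · by_cases hax : a ≤ x
      · have hall' : (t ++ [x]).all (fun y => a ≤ y) := by
          simp_all
        simp only [List.cons_append, pvSfx, hall', if_pos, hall, ih]
        rw [pvMinsDrop_cons _ (by omega)]
        simp
      · have hall' : ¬ (t ++ [x]).all (fun y => a ≤ y) := by
          simp_all
        simp only [List.cons_append, pvSfx, hall', if_neg, hall, if_pos, ih,
          Bool.false_eq_true, not_false_iff]
        have hdrop : pvMinsDrop (a :: pvSfx t) x = [] := by
          apply pvMinsDrop_all_lt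
          intro y hy
          rcases List.mem_cons.mp hy with rfl | hy
          · omega
          · have := of_decide_eq_true (List.all_eq_true.mp hall y (mem_pvSfx hy))
            omega
        have hdrop2 : pvMinsDrop (pvSfx t) x = [] := by
          apply pvMinsDrop_all_lt
          intro y hy
          have := of_decide_eq_true (List.all_eq_true.mp hall y (mem_pvSfx hy))
          omega
        rw [hdrop, hdrop2]
    · have hall' : ¬ (t ++ [x]).all (fun y => a ≤ y) := by
        simp only [List.all_eq_true] at hall ⊢
        intro hc; exact hall (fun y hy => hc y (List.mem_append_left _ hy))
      simp only [List.cons_append, pvSfx, hall', hall, if_neg, ih,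
        Bool.false_eq_true, not_false_iff]

-- MinQueue.popleft maintains pvSfx of the window
theorem pvSfx_popleft (a : Int) (t : List Int) :
    (if (pvSfx (a :: t)).headD 0 = a then (pvSfx (a :: t)).tail else pvSfx (a :: t)) = pvSfx t := by
  by_cases hall : t.all (fun x => a ≤ x)
  · simp [pvSfx, hall]
  · have ht : t ≠ [] := by rintro rfl; simp at hall
    have hne : (pvSfx t).headD 0 ≠ a := by
      obtain ⟨hmem, hmin⟩ := pvSfx_head_min ht 0
      simp only [List.all_eq_true, not_forall] at hall
      obtain ⟨z, hz, hza⟩ := hall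
      have hza' : z < a := by
        by_contra hc
        exact hza (decide_eq_true (by omega))
      have := hmin z hz
      omega
    have hstep : pvSfx (a :: t) = pvSfx t := by rw [pvSfx, if_neg hall]
    rw [hstep, if_neg hne]

-- head of the mins deque = Python min() of the window
theorem pvSfx_head_eq_min? {w : List Int} (h : w ≠ []) :
    (pvSfx w).headD 0 = (PySem.List.min? w (fun y => y)).getD 0 := by
  obtain ⟨m, hm⟩ := Option.ne_none_iff_exists'.mp
    (fun hn => h ((PySem.List.min?_eq_none_iff w (fun y : Int => y)).mp hn))
  rw [hm]
  obtain ⟨hmem, hmin⟩ := pvSfx_head_min h 0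
  have h1 := PySem.List.min?_mem hm
  have h2 := PySem.List.min?_isMin hm
  simp only [Option.getD_some]
  exact le_antisymm (hmin m h1) (h2 _ hmem)

-- number of popleft's performed by A after processing the first m days
def pvPops (len kn m : Nat) : Nat := min (m - kn) (len - 1 - kn)

-- Bfold t = B's answer accumulator after the first t candidate pairs
def pvBfold (days : List Int) (k t : Int) : Int :=
  (PySem.List.pyRange 0 t 1).foldl (pvBStep days k) (days.length : Int)

theorem pvPyRange_nil (t : Int) (h : t ≤ 0) : PySem.List.pyRange 0 t 1 = [] := by
  simp [PySem.List.pyRange]; omega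

theorem pvBfold_le (days : List Int) (k : Int) (L : List Int) (init : Int) :
    L.foldl (pvBStep days k) init ≤ init := by
  induction L generalizing init with
  | nil => simp
  | cons l L ih =>
    refine le_trans (ih _) ?_
    simp only [pvBStep]
    split_ifs
    · exact min_le_left _ _
    · exact le_refl _

theorem pvBfold_succ (days : List Int) (k : Int) (t : Nat) :
    pvBfold days k (t + 1 : Nat) =
      pvBStep days k (pvBfold days k (t : Nat)) (t : Int) := by
  unfold pvBfold
  rw [show ((t + 1 : Nat) : Int) = (t : Int) + 1 by push_cast; ring]
  rw [PySem.List.pyRange_one_succ_right (by omega)]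
  rw [List.foldl_append]
  simp

-- the main invariant: after the first m steps of A's loop, the window is
-- days[pops..m), the mins deque is pvSfx of it, and ans is B's fold so far
theorem pvInv (days : List Int) (k : Int) (hk : 0 ≤ k) (m : Nat) (hm : m ≤ days.length) :
    (PySem.List.enumerate (days.take m) 0).foldl (pvAStep days k (days.length : Int))
        (([] : List Int), ([] : List Int), (days.length : Int)) =
      ((days.take m).drop (pvPops days.length k.toNat m),
       pvSfx ((days.take m).drop (pvPops days.length k.toNat m)),
       pvBfold days k (pvPops days.length k.toNat m : Nat)) := by
  induction m with
  | zero =>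
    simp [pvPops, pvBfold, pvSfx, pvPyRange_nil 0 le_rfl]
  | succ m ih =>
    have hmlt : m < days.length := by omega
    have ihh := ih (by omega)
    set kn := k.toNat with hkn
    have hkk : (kn : Int) = k := Int.toNat_of_nonneg hk
    set len := days.length with hlen
    set pm := pvPops len kn m with hpm
    have hpmle : pm ≤ m := by simp only [hpm, pvPops]; omega
    rw [List.take_succ_eq_append_getElem hmlt, PySem.List.enumerate_append, List.foldl_append, ihh]
    have hlt : (days.take m).length = m := by simp [List.length_take]; omega
    rw [hlt]
    have henum1 : PySem.List.enumerate [days[m]] (0 + (m : Int)) = [((m : Int), days[m])] := by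
      simp [PySem.List.enumerate]
    rw [henum1, List.foldl_cons, List.foldl_nil]
    -- the appended window element
    have hq : (days.take m).drop pm ++ [days[m]] = (days.take (m + 1)).drop pm := by
      rw [List.take_succ_eq_append_getElem hmlt, List.drop_append_of_le_length (by omega)]
    by_cases hc : kn ≤ m ∧ m + 1 < len
    · -- popleft happens at this step
      have hcond : k ≤ (m : Int) ∧ (m : Int) < (len : Int) - 1 := by
        constructor <;> [omega; omega]
      have hpmv : pm = m - kn := by simp only [hpm, pvPops]; omega
      have hpm' : pvPops len kn (m + 1) = pm + 1 := by simp only [hpm, pvPops]; omega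
      simp only [pvAStep, if_pos hcond]
      rw [← pvSfx_append, hq]
      set q := (days.take (m + 1)).drop pm with hqdef
      have hqlen : q.length = m + 1 - pm := by
        simp [hqdef, List.length_take]; omega
      have hqne : q ≠ [] := by
        intro hnil; rw [hnil] at hqlen; simp at hqlen; omega
      have hhead : q.headD 0 = days[pm] := by
        rw [List.headD_eq_head?, hqdef, List.head?_drop, List.getElem?_take_of_lt (by omega),
          List.getElem?_eq_getElem (by omega)]
        rfl
      have htail : q.tail = (days.take (m + 1)).drop (pm + 1) := by
        rw [hqdef, List.tail_drop]
      have hqcons : q = days[pm] :: q.tail := by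
        conv_lhs => rw [← List.cons_head_tail hqne]
        rw [← hhead, List.headD_eq_head?, List.head?_eq_some_head hqne]
        rfl
      -- mins after popleft
      rw [hhead]
      rw [show pvSfx q = pvSfx (days[pm] :: q.tail) from by rw [← hqcons]]
      rw [pvSfx_popleft days[pm] q.tail]
      -- the B-side step
      have hpmi : ((pm : Int)) = (m : Int) - k := by omega
      have hq2 : q.tail = PySem.List.slice days (some ((m : Int) - k + 1)) (some ((m : Int) + 1)) := by
        rw [htail]
        rw [show ((m : Int) - k + 1) = ((pm + 1 : Nat) : Int) by omega,
          show ((m : Int) + 1) = ((m + 1 : Nat) : Int) by push_cast; ring,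
          PySem.List.slice_natCast, List.drop_take]
      have hB : pvBfold days k ((pm + 1 : Nat) : Nat) =
          pvBStep days k (pvBfold days k (pm : Nat)) ((pm : Int)) := pvBfold_succ days k pm
      rw [hpm', hB]
      simp only [pvBStep, hpmi]
      rw [show (m : Int) - k + k + 1 = (m : Int) + 1 by ring]
      have htail' : (List.take m days ++ [days[m]]).drop (pm + 1) = q.tail := by
        rw [htail, List.take_succ_eq_append_getElem hmlt]
      by_cases hk0 : k = 0
      · rw [htail']
        simp [hk0]
      · have hq2ne : q.tail ≠ [] := by
          intro hnil
          have := congrArg List.length hnil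
          rw [List.length_tail, hqlen] at this
          simp at this
          omega
        rw [htail', ← hq2, ← pvSfx_head_eq_min? hq2ne]
    · -- no popleft at this step
      have hcond : ¬ (k ≤ (m : Int) ∧ (m : Int) < (len : Int) - 1) := by
        intro hcc; exact hc ⟨by omega, by omega⟩
      have hpm' : pvPops len kn (m + 1) = pm := by
        simp only [hpm, pvPops]; omega
      simp only [pvAStep, if_neg hcond]
      rw [hpm', ← pvSfx_append, hq, List.take_succ_eq_append_getElem hmlt]

-- length of days = length of flowers
theorem pvBuildDays_length (flowers : List Int) : (pvBuildDays flowers).length = flowers.length := by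
  unfold pvBuildDays
  have h : ∀ (L : List (Int × Int)) (init : List Int),
      (L.foldl (fun days dp => PySem.List.pySetD days (dp.2 - 1) dp.1) init).length = init.length := by
    intro L
    induction L with
    | nil => intro init; rfl
    | cons p L ih =>
      intro init
      rw [List.foldl_cons, ih, PySem.List.length_pySetD]
  rw [h]
  exact List.length_replicate

-- ===== VERDICT (by name: the statement is the Claim_ definition above) =====
theorem kEmptySlots2_spec : Claim_equal_kEmptySlots2 := by
  intro flowers k _ hpre
  obtain ⟨hk, -⟩ := hpre
  unfold Spec_kEmptySlots2 kEmptySlots2 kEmptySlots2_alt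
  have hdl : (pvBuildDays flowers).length = flowers.length := pvBuildDays_length flowers
  have hinv := pvInv (pvBuildDays flowers) k hk (pvBuildDays flowers).length le_rfl
  rw [List.take_length] at hinv
  simp only [hinv]
  have hle : pvBfold (pvBuildDays flowers) k
      ((pvPops (pvBuildDays flowers).length k.toNat (pvBuildDays flowers).length : Nat) : Int) ≤
      ((pvBuildDays flowers).length : Int) := by
    rw [pvBfold]; exact pvBfold_le _ _ _ _
  rw [if_pos hle]
  rw [pvBfold, hdl]
  have hkk : (k.toNat : Int) = k := Int.toNat_of_nonneg hk
  by_cases hcase : 1 ≤ flowers.length ∧ k.toNat + 1 ≤ flowers.length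
  · have hcast : ((pvPops flowers.length k.toNat flowers.length : Nat) : Int) =
        (flowers.length : Int) - k - 1 := by
      simp only [pvPops]; omega
    rw [hcast]
  · have h1 : pvPops flowers.length k.toNat flowers.length = 0 := by
      simp only [pvPops]; omega
    have h2 : ((flowers.length : Int) - k - 1) ≤ 0 := by omega
    rw [h1, pvPyRange_nil _ h2]
    simp [pvPyRange_nil 0 le_rfl]
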